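-- pv_equiv track=rewrite | github.com/PrzeChoj/python | lab_04/4_p1.py | licz
-- ===== SOURCE A (Python) =====
-- def licz(x, y):
-- 	"""
-- 	sprawdza i zlicza wartości z dwóch list
-- 	z czego pierwsza jest testowa, a druga prawdziwa
-- 	funkcja zwraca listę zawierającą odpowiednio TN, FP, FN, TP
-- 	"""
-- 	assert len(x) == len(y)
-- 	TN = 0
-- 	FP = 0
-- 	FN = 0
-- 	TP = 0
-- 	for i in range(len(x)):
-- 		if x[i] == 0 and y[i] == 0:
-- 			TN += 1
-- 		if x[i] == 1 and y[i] == 0: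
-- 			FP += 1
-- 		if x[i] == 0 and y[i] == 1:
-- 			FN += 1
-- 		if x[i] == 1 and y[i] == 1:
-- 			TP += 1
-- 	return [TN, FP, FN, TP]
-- ===== SOURCE B (Python) =====
-- def licz(x, y):
-- 	"""
-- 	sprawdza i zlicza wartości z dwóch list
-- 	z czego pierwsza jest testowa, a druga prawdziwa
-- 	funkcja zwraca listę zawierającą odpowiednio TN, FP, FN, TP
-- 	"""
-- 	assert len(x) == len(y)
-- 	pairs = list(zip(x, y))
-- 	return [pairs.count(p) for p in [(0, 0), (1, 0), (0, 1), (1, 1)]]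
-- ===== Notes on version B (the rewrite author's own statement) =====
-- stated objective: idiomatic
-- what changed: Replaces the single index loop with four per-element branch tests and four mutable counters by zipping the lists once and making four staged list.count passes, one per outcome pair (0,0),(1,0),(0,1),(1,1).
import Mathlib
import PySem

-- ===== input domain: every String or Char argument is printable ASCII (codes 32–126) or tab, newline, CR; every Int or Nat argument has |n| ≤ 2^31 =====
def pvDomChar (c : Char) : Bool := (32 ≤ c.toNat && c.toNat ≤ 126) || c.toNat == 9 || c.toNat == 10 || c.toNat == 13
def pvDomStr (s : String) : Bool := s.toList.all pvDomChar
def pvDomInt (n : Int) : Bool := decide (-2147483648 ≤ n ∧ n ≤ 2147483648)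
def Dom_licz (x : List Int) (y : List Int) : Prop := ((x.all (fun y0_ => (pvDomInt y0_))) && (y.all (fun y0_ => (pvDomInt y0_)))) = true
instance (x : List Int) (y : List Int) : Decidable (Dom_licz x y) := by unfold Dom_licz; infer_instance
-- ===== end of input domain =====

-- B zips the lists once and counts each of the four outcome pairs with a staged list.count
-- pass, instead of A's single index loop with four per-element branches (objective: idiomatic).

-- ===== PORT A =====
-- the body of A's loop: four independent ifs updating the state (TN, FP, FN, TP)
def liczStep (s : Int × Int × Int × Int) (xi yi : Int) : Int × Int × Int × Int :=
  let s := if xi = 0 ∧ yi = 0 then (s.1 + 1, s.2.1, s.2.2.1, s.2.2.2) else s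
  let s := if xi = 1 ∧ yi = 0 then (s.1, s.2.1 + 1, s.2.2.1, s.2.2.2) else s
  let s := if xi = 0 ∧ yi = 1 then (s.1, s.2.1, s.2.2.1 + 1, s.2.2.2) else s
  let s := if xi = 1 ∧ yi = 1 then (s.1, s.2.1, s.2.2.1, s.2.2.2 + 1) else s
  s

def licz (x : List Int) (y : List Int) : List Int :=
  if x.length = y.length then
    let s := (PySem.List.pyRange 0 (x.length : Int) 1).foldl
      (fun s i => liczStep s (PySem.List.pyGetD x i 0) (PySem.List.pyGetD y i 0))
      (0, 0, 0, 0)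
    [s.1, s.2.1, s.2.2.1, s.2.2.2]
  else []  -- assert fails in Python: outside Pre_licz

-- ===== PORT B =====
def licz_alt (x : List Int) (y : List Int) : List Int :=
  if x.length = y.length then
    let pairs := x.zip y
    ([((0 : Int), (0 : Int)), (1, 0), (0, 1), (1, 1)]).map
      (fun p => (PySem.List.count pairs p : Int))
  else []  -- assert fails in Python: outside Pre_licz

-- ===== PRECONDITION & SPEC =====
-- Pre_ excludes exactly the inputs on which A's assert raises AssertionError
def Pre_licz (x : List Int) (y : List Int) : Prop := x.length = y.length
instance (x : List Int) (y : List Int) : Decidable (Pre_licz x y) := by unfold Pre_licz; infer_instance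
def pvWitness_licz : List Int × List Int := ([0, 1, 1, 0, 2], [0, 0, 1, 1, 1])

def Spec_licz (x : List Int) (y : List Int) (out : List Int) : Prop := out = licz_alt x y
instance (x : List Int) (y : List Int) (out : List Int) : Decidable (Spec_licz x y out) := by unfold Spec_licz; infer_instance

-- ===== CLAIM (what is proved, stated in full; the proofs are below) =====
def Claim_equal_licz : Prop := ∀ (x : List Int) (y : List Int), Dom_licz x y → Pre_licz x y → Spec_licz x y (licz x y)

-- ===== LEMMAS AND PROOFS =====

-- A's index loop equals a fold over the zipped tail lists
lemma licz_fold_index_eq_zip (x y : List Int) (hlen : x.length = y.length) :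
    ∀ (k : Nat) (s0 : Int × Int × Int × Int),
      (PySem.List.pyRange (k : Int) (x.length : Int) 1).foldl
        (fun s i => liczStep s (PySem.List.pyGetD x i 0) (PySem.List.pyGetD y i 0)) s0
      = ((x.drop k).zip (y.drop k)).foldl (fun s p => liczStep s p.1 p.2) s0 := by
  intro k
  induction hk : x.length - k generalizing k with
  | zero =>
    intro s0
    have hge : x.length ≤ k := by omega
    rw [PySem.List.pyRange_one_eq_nil (by exact_mod_cast hge)]
    rw [List.drop_eq_nil_of_le hge]
    simp
  | succ m ih =>
    intro s0
    have hlt : k < x.length := by omega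
    rw [PySem.List.pyRange_one_cons (by exact_mod_cast hlt)]
    rw [List.foldl_cons]
    have h1 : ((k : Int) + 1) = ((k + 1 : Nat) : Int) := by push_cast; ring
    rw [h1, ih (k + 1) (by omega)]
    have hx : PySem.List.pyGetD x (k : Int) 0 = x[k] := by
      rw [PySem.List.pyGetD_natCast]; exact List.getD_eq_getElem x 0 hlt
    have hy : PySem.List.pyGetD y (k : Int) 0 = y[k]'(by omega) := by
      rw [PySem.List.pyGetD_natCast]; exact List.getD_eq_getElem y 0 (by omega)
    rw [hx, hy]
    conv_rhs => rw [List.drop_eq_getElem_cons hlt, List.drop_eq_getElem_cons (show k < y.length by omega)]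
    rw [List.zip_cons_cons, List.foldl_cons]

-- each component of A's loop body, in closed form
lemma liczStep_1 (s : Int × Int × Int × Int) (xi yi : Int) :
    (liczStep s xi yi).1 = s.1 + (if xi = 0 ∧ yi = 0 then 1 else 0) := by
  simp only [liczStep]; split_ifs <;> simp

lemma liczStep_2 (s : Int × Int × Int × Int) (xi yi : Int) :
    (liczStep s xi yi).2.1 = s.2.1 + (if xi = 1 ∧ yi = 0 then 1 else 0) := by
  simp only [liczStep]; split_ifs <;> simp

lemma liczStep_3 (s : Int × Int × Int × Int) (xi yi : Int) :
    (liczStep s xi yi).2.2.1 = s.2.2.1 + (if xi = 0 ∧ yi = 1 then 1 else 0) := by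
  simp only [liczStep]; split_ifs <;> simp

lemma liczStep_4 (s : Int × Int × Int × Int) (xi yi : Int) :
    (liczStep s xi yi).2.2.2 = s.2.2.2 + (if xi = 1 ∧ yi = 1 then 1 else 0) := by
  simp only [liczStep]; split_ifs <;> simp

-- the zip fold accumulates the four pair-counts
lemma licz_fold_counts (z : List (Int × Int)) :
    ∀ (s : Int × Int × Int × Int),
      z.foldl (fun s p => liczStep s p.1 p.2) s
      = (s.1 + z.count (0, 0), s.2.1 + z.count (1, 0), s.2.2.1 + z.count (0, 1), s.2.2.2 + z.count (1, 1)) := by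
  induction z with
  | nil => intro s; simp
  | cons p z ih =>
    intro s
    rw [List.foldl_cons, ih]
    obtain ⟨p1, p2⟩ := p
    refine Prod.ext ?_ (Prod.ext ?_ (Prod.ext ?_ ?_)) <;>
      simp only [liczStep_1, liczStep_2, liczStep_3, liczStep_4, List.count_cons,
        beq_iff_eq, Prod.mk.injEq] <;>
      split_ifs <;> push_cast <;> omega

-- ===== VERDICT (by name: the statement is the Claim_ definition above) =====
theorem licz_spec : Claim_equal_licz := by
  intro x y _ hpre
  have hlen : x.length = y.length := hpre
  unfold Spec_licz licz licz_alt
  rw [if_pos hlen, if_pos hlen]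
  have h := licz_fold_index_eq_zip x y hpre 0 (0, 0, 0, 0)
  simp only [Nat.cast_zero] at h
  rw [h]
  simp only [List.drop_zero]
  rw [licz_fold_counts]
  simp [PySem.List.count_eq]
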